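-- pv_equiv track=rewrite | github.com/brunnurs/PA1 | dto/buy_entry.py | concat_dasherized_expressions
-- ===== SOURCE A (Python) =====
-- def concat_dasherized_expressions(value):
--     """
--     remove dashes if they are in between of a word
--     :param value:
--     :return:
--     """
--     dashes_to_remove = []
--     for idx, char in enumerate(value):
--         if char == '-':
--             if value[idx - 1].isalnum() and value[idx + 1].isalnum():
--                 dashes_to_remove.append(idx)
--
--     pruned_string = value
--
--     # reverse order matters as we change the index after the one we remove.
--     for index_to_remove in reversed(dashes_to_remove):
--         pruned_string = pruned_string[:index_to_remove] + pruned_string[index_to_remove + 1:]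
--
--     return pruned_string
-- ===== SOURCE B (Python) =====
-- def concat_dasherized_expressions(value):
--     """
--     remove dashes if they are in between of a word
--     (align three streams: each char with its left and right neighbour, '' at the ends,
--     and keep the chars that are not a dash between two alphanumerics)
--     """
--     chars = list(value)
--     prevs = [''] + chars[:-1]
--     nexts = chars[1:] + ['']
--     return ''.join(c for p, c, n in zip(prevs, chars, nexts)
--                    if not (c == '-' and p.isalnum() and n.isalnum()))
-- ===== Notes on version B (the rewrite author's own statement) =====
-- stated objective: alternative
-- what changed: B aligns each character with its two neighbours by zipping three shifted copies of the string (with '' past the ends) and keeps the non-removable characters in one comprehension, instead of A's two passes that first collect dash indices and then repeatedly re-slice the string in reverse index order.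
-- intended difference: On strings that start with '-' whose second and last characters are alphanumeric, A's negative-index wraparound consults value[-1] and deletes the leading dash (e.g. '-ab' -> 'ab'), while B keeps it ('-ab'), which is intended since a leading dash is not between a word. — e.g. on concat_dasherized_expressions("-ab"): A returns "ab", B returns "-ab"
import Mathlib
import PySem

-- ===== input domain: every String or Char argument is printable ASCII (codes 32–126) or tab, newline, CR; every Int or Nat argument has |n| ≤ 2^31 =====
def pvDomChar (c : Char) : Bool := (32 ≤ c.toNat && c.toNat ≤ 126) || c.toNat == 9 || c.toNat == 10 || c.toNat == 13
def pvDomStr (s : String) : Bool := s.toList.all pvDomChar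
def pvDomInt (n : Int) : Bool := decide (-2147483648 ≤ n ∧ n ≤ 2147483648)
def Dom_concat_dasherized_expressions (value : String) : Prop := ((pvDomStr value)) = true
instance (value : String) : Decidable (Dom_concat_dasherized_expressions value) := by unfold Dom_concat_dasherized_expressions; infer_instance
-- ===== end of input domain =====

-- B zips three shifted copies of the string (each char with its two neighbours, none at the
-- ends) and keeps the non-removable characters in one filtered pass, instead of A's
-- collect-dash-indices-then-reslice-in-reverse scheme (objective: alternative); on strings
-- with a removable-looking leading dash B intentionally differs from A (see D_ below).

-- ===== PORT A =====
-- value[i].isalnum() with Python index semantics (negative index wraps; none = IndexError,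
-- which Pre_ excludes — the `false` branch is only a totalisation and is never reached inside Pre_).
def pvAlnumAt (cs : List Char) (i : Int) : Bool :=
  match PySem.List.pyGet? cs i with
  | some c => PySem.Chars.isalnum c
  | none => false

def concat_dasherized_expressions (value : String) : String :=
  let cs := value.toList
  let dashes_to_remove : List Int :=
    (PySem.List.enumerate cs).foldl
      (fun acc ic =>
        if ic.2 == '-' && pvAlnumAt cs (ic.1 - 1) && pvAlnumAt cs (ic.1 + 1) then
          acc ++ [ic.1]
        else acc) []
  let pruned :=
    dashes_to_remove.reverse.foldl
      (fun s i => PySem.List.slice s none (some i) ++ PySem.List.slice s (some (i + 1)) none) cs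
  String.ofList pruned

-- ===== PORT B =====
-- ''.isalnum() for the '' padding Python B puts past the two ends: none ↦ false
def pvOptAlnum : Option Char → Bool
  | some c => PySem.Chars.isalnum c
  | none => false

def concat_dasherized_expressions_alt (value : String) : String :=
  let chars := value.toList
  let prevs : List (Option Char) := none :: chars.dropLast.map some
  let nexts : List (Option Char) := chars.tail.map some ++ [none]
  String.ofList
    (((prevs.zip (chars.zip nexts)).filter
        (fun pcn => !(pcn.2.1 == '-' && pvOptAlnum pcn.1 && pvOptAlnum pcn.2.2))).map
      (fun pcn => pcn.2.1))

-- ===== PRECONDITION & SPEC =====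
-- Pre_ excludes exactly the strings on which Python A raises IndexError: a trailing dash whose
-- left neighbour value[len-2] is alphanumeric (value[idx+1] is evaluated past the end there).
def Pre_concat_dasherized_expressions (value : String) : Prop :=
  ¬ (value.toList.getLast? = some '-' ∧
     (value.toList.dropLast.getLast?.elim false PySem.Chars.isalnum) = true)
instance (value : String) : Decidable (Pre_concat_dasherized_expressions value) := by
  unfold Pre_concat_dasherized_expressions; infer_instance

def pvWitness_concat_dasherized_expressions : String := "a-b"

-- On strings that start with '-' whose second and last characters are alphanumeric, A's
-- negative-index wraparound consults value[-1] and deletes the leading dash ("-ab" -> "ab"),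
-- while B keeps it ("-ab"), which is intended since a leading dash is not between a word.
def D_concat_dasherized_expressions (value : String) : Prop :=
  value.toList.head? = some '-' ∧
  (value.toList.getLast?.elim false PySem.Chars.isalnum) = true ∧
  (value.toList.tail.head?.elim false PySem.Chars.isalnum) = true
instance (value : String) : Decidable (D_concat_dasherized_expressions value) := by
  unfold D_concat_dasherized_expressions; infer_instance

def Spec_concat_dasherized_expressions (value : String) (out : String) : Prop :=
  ¬ D_concat_dasherized_expressions value → out = concat_dasherized_expressions_alt value
instance (value : String) (out : String) : Decidable (Spec_concat_dasherized_expressions value out) := by unfold Spec_concat_dasherized_expressions; infer_instance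

def pvDiffWitness_concat_dasherized_expressions : String := "-ab"
def pvDiffWitnessOut_concat_dasherized_expressions : String × String := ("ab", "-ab")

-- ===== CLAIM (what is proved, stated in full; the proofs are below) =====
def Claim_unchanged_concat_dasherized_expressions : Prop := ∀ (value : String), Dom_concat_dasherized_expressions value → Pre_concat_dasherized_expressions value → Spec_concat_dasherized_expressions value (concat_dasherized_expressions value)
def Claim_changed_concat_dasherized_expressions : Prop := Dom_concat_dasherized_expressions (pvDiffWitness_concat_dasherized_expressions) ∧ Pre_concat_dasherized_expressions (pvDiffWitness_concat_dasherized_expressions) ∧ D_concat_dasherized_expressions (pvDiffWitness_concat_dasherized_expressions) ∧ concat_dasherized_expressions (pvDiffWitness_concat_dasherized_expressions) = pvDiffWitnessOut_concat_dasherized_expressions.1 ∧ concat_dasherized_expressions_alt (pvDiffWitness_concat_dasherized_expressions) = pvDiffWitnessOut_concat_dasherized_expressions.2 ∧ pvDiffWitnessOut_concat_dasherized_expressions.1 ≠ pvDiffWitnessOut_concat_dasherized_expressions.2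
def Claim_exact_concat_dasherized_expressions : Prop := ∀ (value : String), Dom_concat_dasherized_expressions value → Pre_concat_dasherized_expressions value → D_concat_dasherized_expressions value → concat_dasherized_expressions value ≠ concat_dasherized_expressions_alt value

-- ===== LEMMAS AND PROOFS =====

-- ---- A-side: phase 2 (reverse reslicing) deletes exactly the selected characters ----

-- A's phase-2 deletion step, for ONE index
def pvErase (s : List Char) (i : Int) : List Char :=
  PySem.List.slice s none (some i) ++ PySem.List.slice s (some (i + 1)) none

theorem pvErase_nonneg (s : List Char) (i : Int) (h : 0 ≤ i) :
    pvErase s i = s.take i.toNat ++ s.drop (i.toNat + 1) := by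
  unfold pvErase
  rw [PySem.List.slice_to s h, PySem.List.slice_from s (by omega : (0:Int) ≤ i + 1)]
  congr 2
  omega

theorem pvErase_zero (s : List Char) : pvErase s 0 = s.drop 1 := by
  simp [pvErase_nonneg s 0 le_rfl]

theorem pvErase_cons (c : Char) (t : List Char) (i : Int) (h : 0 ≤ i) :
    pvErase (c :: t) (i + 1) = c :: pvErase t i := by
  rw [pvErase_nonneg _ _ (by omega), pvErase_nonneg _ _ h]
  have h1 : (i + 1).toNat = i.toNat + 1 := by omega
  simp [h1, List.take_succ_cons, List.drop_succ_cons]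

theorem pvEnum_shift {α : Type} (xs : List α) (k : Int) :
    PySem.List.enumerate xs (k + 1)
      = (PySem.List.enumerate xs k).map (fun ic => (ic.1 + 1, ic.2)) := by
  induction xs generalizing k with
  | nil => simp [PySem.List.enumerate]
  | cons c t ih =>
      simp only [PySem.List.enumerate, List.map_cons, List.cons.injEq]
      exact ⟨trivial, ih (k + 1)⟩

theorem pvEnum_fst_le {α : Type} (xs : List α) (k : Int) :
    ∀ ic ∈ PySem.List.enumerate xs k, k ≤ ic.1 := by
  induction xs generalizing k with
  | nil => simp [PySem.List.enumerate]
  | cons c t ih =>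
      intro ic hic
      simp only [PySem.List.enumerate, List.mem_cons] at hic
      rcases hic with h | h
      · simp [h]
      · have := ih (k + 1) ic h; omega

-- foldr over an index list shifted by +1, applied to c :: t
theorem pvFoldr_erase_shift (c : Char) (t : List Char) (l : List Int)
    (hl : ∀ i ∈ l, 0 ≤ i) :
    List.foldr (fun i s => pvErase s i) (c :: t) (l.map (fun i => i + 1))
      = c :: List.foldr (fun i s => pvErase s i) t l := by
  induction l with
  | nil => rfl
  | cons i l ih =>
      have h0 : 0 ≤ i := hl i (by simp)
      simp only [List.map_cons, List.foldr_cons]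
      rw [ih (fun j hj => hl j (by simp [hj])), pvErase_cons c _ i h0]

-- deleting the p-selected indices (largest first) = keeping the ¬p-selected chars
theorem pvPhase2 (p : Int × Char → Bool) (xs : List Char) :
    List.foldr (fun i s => pvErase s i) xs
        (((PySem.List.enumerate xs 0).filter p).map Prod.fst)
      = ((PySem.List.enumerate xs 0).filter (fun ic => !p ic)).map Prod.snd := by
  induction xs generalizing p with
  | nil => simp [PySem.List.enumerate]
  | cons c t ih =>
      have hrw := pvEnum_shift t 0
      have hnn : ∀ i ∈ (((PySem.List.enumerate t 0).filter
            (fun ic => p (ic.1 + 1, ic.2))).map Prod.fst), 0 ≤ i := by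
        intro i hi
        simp only [List.mem_map, List.mem_filter] at hi
        obtain ⟨ic, ⟨hmem, _⟩, hfst⟩ := hi
        have := pvEnum_fst_le t 0 ic hmem
        omega
      have hcomp : (List.filter p
            ((PySem.List.enumerate t 0).map (fun ic => (ic.1 + 1, ic.2)))).map Prod.fst
          = (((PySem.List.enumerate t 0).filter
               (fun ic => p (ic.1 + 1, ic.2))).map Prod.fst).map (fun i => i + 1) := by
        rw [List.filter_map]
        simp [List.map_map, Function.comp_def]
      have hcomp2 : (List.filter (fun ic => !p ic)
            ((PySem.List.enumerate t 0).map (fun ic => (ic.1 + 1, ic.2)))).map Prod.snd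
          = ((PySem.List.enumerate t 0).filter
               (fun ic => !p (ic.1 + 1, ic.2))).map Prod.snd := by
        rw [List.filter_map]
        simp [List.map_map, Function.comp_def]
      simp only [PySem.List.enumerate, hrw]
      by_cases hp : p (0, c) = true
      · rw [List.filter_cons_of_pos hp, List.filter_cons_of_neg (by simp [hp])]
        simp only [List.map_cons, List.foldr_cons]
        rw [hcomp, pvFoldr_erase_shift c t _ hnn,
            ih (fun ic => p (ic.1 + 1, ic.2)), pvErase_zero, hcomp2]
        simp
      · rw [List.filter_cons_of_neg (by simp [hp]), List.filter_cons_of_pos (by simp [hp])]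
        simp only [List.map_cons]
        rw [hcomp, pvFoldr_erase_shift c t _ hnn,
            ih (fun ic => p (ic.1 + 1, ic.2)), hcomp2]

-- A's phase-1 accumulator fold is the p-filtered index list
theorem pvFoldA (p : Int × Char → Bool) (l : List (Int × Char)) (acc : List Int) :
    List.foldl (fun acc ic => if p ic then acc ++ [ic.1] else acc) acc l
      = acc ++ (l.filter p).map Prod.fst := by
  induction l generalizing acc with
  | nil => simp
  | cons ic l ih =>
      by_cases hp : p ic
      · simp [List.foldl_cons, hp, ih]
      · simp [List.foldl_cons, hp, ih]

-- so port A = map snd of the ¬p-filter of the enumeration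
theorem pvA_filter (value : String) :
    concat_dasherized_expressions value
      = String.ofList (((PySem.List.enumerate value.toList 0).filter
          (fun ic => !(ic.2 == '-' && pvAlnumAt value.toList (ic.1 - 1)
                        && pvAlnumAt value.toList (ic.1 + 1)))).map Prod.snd) := by
  unfold concat_dasherized_expressions
  set cs := value.toList with hcs
  set p : Int × Char → Bool :=
    fun ic => ic.2 == '-' && pvAlnumAt cs (ic.1 - 1) && pvAlnumAt cs (ic.1 + 1) with hp
  simp only []
  rw [pvFoldA p (PySem.List.enumerate cs) [], List.nil_append, List.foldl_reverse]
  congr 1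
  exact pvPhase2 p cs

-- ---- shared spec: one structural pass carrying the previous character ----

def pvKeep (prev : Option Char) : List Char → List Char
  | [] => []
  | c :: rest =>
      if c == '-' && pvOptAlnum prev && pvOptAlnum rest.head? then pvKeep (some c) rest
      else c :: pvKeep (some c) rest

-- ---- B-side: the zip-filter-map list is pvKeep ----

theorem pvB_keep (pr : Option Char) (l : List Char) :
    (((pr :: l.dropLast.map some).zip (l.zip (l.tail.map some ++ [(none : Option Char)]))).filter
        (fun pcn => !(pcn.2.1 == '-' && pvOptAlnum pcn.1 && pvOptAlnum pcn.2.2))).map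
      (fun pcn => pcn.2.1)
      = pvKeep pr l := by
  induction l generalizing pr with
  | nil => rfl
  | cons c rest ih =>
      cases rest with
      | nil => simp [pvKeep, pvOptAlnum]
      | cons d rest' =>
          simp only [List.dropLast_cons₂, List.map_cons, List.tail_cons, List.zip_cons_cons,
            List.cons_append, pvKeep, List.head?_cons]
          by_cases hp : (c == '-' && pvOptAlnum pr && pvOptAlnum (some d)) = true
          · rw [List.filter_cons_of_neg (by simp [hp]), if_pos hp]
            exact ih (some c)
          · rw [List.filter_cons_of_pos (by simp [hp]), if_neg hp, List.map_cons]
            exact congrArg (c :: ·) (ih (some c))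

theorem pvB_eq (value : String) :
    concat_dasherized_expressions_alt value = String.ofList (pvKeep none value.toList) := by
  unfold concat_dasherized_expressions_alt
  exact congrArg String.ofList (pvB_keep none value.toList)

-- ---- A-side: the filtered enumeration is pvKeep too (away from index 0) ----

theorem pvAlnumAt_natCast (cs : List Char) (k : Nat) :
    pvAlnumAt cs (k : Int) = pvOptAlnum cs[k]? := by
  unfold pvAlnumAt pvOptAlnum
  by_cases h : k < cs.length
  · simp [PySem.List.pyGet?, PySem.List.pyIdx?, h]
  · rw [show PySem.List.pyGet? cs (k : Int) = none by
      simp [PySem.List.pyGet?, PySem.List.pyIdx?]; omega]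
    rw [List.getElem?_eq_none (by omega)]

theorem pvAlnumAt_neg_one (cs : List Char) (h : cs ≠ []) :
    pvAlnumAt cs (-1) = pvOptAlnum cs.getLast? := by
  unfold pvAlnumAt pvOptAlnum
  rw [show PySem.List.pyGet? cs (-1) = cs.getLast? by
    rw [List.getLast?_eq_getElem?]
    have hl : 0 < cs.length := List.length_pos_iff.mpr h
    simp [PySem.List.pyGet?, PySem.List.pyIdx?, show -(cs.length:Int) ≤ -1 by omega]]

-- the tail of A's filtered enumeration, indices ≥ 1, as pvKeep with the true left neighbour
theorem pvA_keep_tail (cs : List Char) (k : Nat) (hk : 1 ≤ k) :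
    ((PySem.List.enumerate (cs.drop k) (k : Int)).filter
        (fun ic => !(ic.2 == '-' && pvAlnumAt cs (ic.1 - 1)
                      && pvAlnumAt cs (ic.1 + 1)))).map Prod.snd
      = pvKeep cs[k-1]? (cs.drop k) := by
  cases hdk : cs.drop k with
  | nil => simp [PySem.List.enumerate, pvKeep]
  | cons c rest =>
      have hrest : rest = cs.drop (k + 1) := by
        have := congrArg List.tail hdk
        simpa [List.tail_drop] using this.symm
      have hhead : rest.head? = cs[k+1]? := by rw [hrest]; exact List.head?_drop
      have hm1 : (k : Int) - 1 = ((k - 1 : Nat) : Int) := by omega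
      have hp1 : (k : Int) + 1 = ((k + 1 : Nat) : Int) := by omega
      have hcond : (c == '-' && pvAlnumAt cs ((k : Int) - 1) && pvAlnumAt cs ((k : Int) + 1))
          = (c == '-' && pvOptAlnum cs[k-1]? && pvOptAlnum rest.head?) := by
        rw [hm1, hp1, pvAlnumAt_natCast, pvAlnumAt_natCast, hhead]
      rw [PySem.List.enumerate_cons]
      have ih := pvA_keep_tail cs (k + 1) (by omega)
      have hck : cs[k]? = some c := by rw [← List.head?_drop, hdk]; rfl
      by_cases hc : (c == '-' && pvOptAlnum cs[k-1]? && pvOptAlnum rest.head?) = true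
      · rw [List.filter_cons_of_neg (by simp [hcond, hc]), pvKeep, if_pos hc]
        rw [hp1, hrest, ih]
        simpa using congrArg (fun o => pvKeep o (cs.drop (k+1))) hck
      · rw [List.filter_cons_of_pos (by simp [hcond, hc]), pvKeep, if_neg hc, List.map_cons]
        rw [hp1, hrest, ih]
        simpa using congrArg (fun o => c :: pvKeep o (cs.drop (k+1))) hck
  termination_by cs.length - k
  decreasing_by
    have : k < cs.length := by
      by_contra hge
      rw [List.drop_eq_nil_of_le (by omega)] at hdk
      simp at hdk
    omega

theorem pvString_ofList_inj (l1 l2 : List Char) (h : String.ofList l1 = String.ofList l2) :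
    l1 = l2 := by
  have := congrArg String.toList h
  simpa [String.toList_ofList] using this

theorem pvOptAlnum_elim (o : Option Char) :
    o.elim false PySem.Chars.isalnum = pvOptAlnum o := by
  cases o <;> rfl

theorem pvKeep_none_cons (c : Char) (rest : List Char) :
    pvKeep none (c :: rest) = c :: pvKeep (some c) rest := by
  simp [pvKeep, pvOptAlnum]

-- D_ at a nonempty string is exactly A's removal test for index 0
theorem pvD_iff (value : String) (c : Char) (rest : List Char) (hcs : value.toList = c :: rest) :
    D_concat_dasherized_expressions value
      ↔ (c == '-' && pvOptAlnum (c :: rest).getLast? && pvOptAlnum rest.head?) = true := by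
  unfold D_concat_dasherized_expressions
  rw [hcs]
  simp [pvOptAlnum_elim, and_assoc]

-- port A at a nonempty string: index 0 is removed or kept by that test, the rest is pvKeep
theorem pvA_keep (value : String) (c : Char) (rest : List Char)
    (hcs : value.toList = c :: rest) :
    concat_dasherized_expressions value
      = String.ofList
          (if (c == '-' && pvOptAlnum (c :: rest).getLast? && pvOptAlnum rest.head?) = true
           then pvKeep (some c) rest
           else c :: pvKeep (some c) rest) := by
  rw [pvA_filter, hcs, PySem.List.enumerate_cons]
  have hne : c :: rest ≠ [] := by simp
  have h0 : pvAlnumAt (c :: rest) (-1) = pvOptAlnum (c :: rest).getLast? :=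
    pvAlnumAt_neg_one _ hne
  have h1 : pvAlnumAt (c :: rest) 1 = pvOptAlnum rest.head? := by
    rw [show (1 : Int) = ((1 : Nat) : Int) by norm_num, pvAlnumAt_natCast]
    simp [List.head?_eq_getElem?]
  have htail := pvA_keep_tail (c :: rest) 1 le_rfl
  simp only [List.drop_one, List.tail_cons,
    show ((1 : Nat) - 1 : Nat) = 0 by rfl, List.getElem?_cons_zero] at htail
  rw [show ((0 : Int) + 1) = ((1 : Nat) : Int) by norm_num]
  by_cases hd : (c == '-' && pvOptAlnum (c :: rest).getLast? && pvOptAlnum rest.head?) = true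
  · rw [List.filter_cons_of_neg (by
        show ¬ (!(c == '-' && pvAlnumAt (c :: rest) ((0:Int) - 1)
                  && pvAlnumAt (c :: rest) ((0:Int) + 1))) = true
        rw [show ((0:Int) - 1) = -1 by ring, show ((0:Int) + 1) = 1 by ring, h0, h1, hd]
        simp), if_pos hd, htail]
  · have hd' : (c == '-' && pvOptAlnum (c :: rest).getLast? && pvOptAlnum rest.head?) = false := by
      simpa using hd
    rw [List.filter_cons_of_pos (by
        show (!(c == '-' && pvAlnumAt (c :: rest) ((0:Int) - 1)
                && pvAlnumAt (c :: rest) ((0:Int) + 1))) = true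
        rw [show ((0:Int) - 1) = -1 by ring, show ((0:Int) + 1) = 1 by ring, h0, h1, hd']
        rfl), if_neg hd, List.map_cons, htail]

-- ===== VERDICT (by name: the statements are the Claim_ definitions above) =====
theorem concat_dasherized_expressions_spec : Claim_unchanged_concat_dasherized_expressions := by
  intro value _ _ hD
  rw [pvB_eq]
  cases hcs : value.toList with
  | nil =>
      rw [pvA_filter, hcs]
      simp [PySem.List.enumerate, pvKeep]
  | cons c rest =>
      rw [pvA_keep value c rest hcs, pvKeep_none_cons,
          if_neg (fun hd => hD ((pvD_iff value c rest hcs).mpr hd))]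

theorem concat_dasherized_expressions_changed : Claim_changed_concat_dasherized_expressions := by
  unfold Claim_changed_concat_dasherized_expressions; decide

theorem concat_dasherized_expressions_tight : Claim_exact_concat_dasherized_expressions := by
  intro value _ _ hD heq
  cases hcs : value.toList with
  | nil =>
      have := hD.1
      rw [hcs] at this
      simp at this
  | cons c rest =>
      have hd := (pvD_iff value c rest hcs).mp hD
      rw [pvA_keep value c rest hcs, if_pos hd, pvB_eq, hcs, pvKeep_none_cons] at heq
      have := congrArg List.length (pvString_ofList_inj _ _ heq)
      simp at this
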